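-- pv_equiv track=rewrite | github.com/pypi-data/pypi-mirror-395 | packages/mitos/mitos-2.1.10-py3-none-any.whl/mitos/mitoloc.py | mitos_in_subtree
-- ===== SOURCE A (Python) =====
-- def mitos_in_subtree(id, chld, taxidacc):
--     cont = set()
--
--     if id in chld:
--         for c in chld[id]:
--             cont.update(mitos_in_subtree(c, chld, taxidacc))
--     else:
--         if id in taxidacc:
--             cont.add((id, taxidacc[id]))
--
--     return cont
-- ===== SOURCE B (Python) =====
-- def mitos_in_subtree(id, chld, taxidacc):
--     result = set()
--     stack = [id]
--     while stack:
--         node = stack.pop()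
--         if node in chld:
--             stack.extend(reversed(chld[node]))
--         elif node in taxidacc:
--             result.add((node, taxidacc[node]))
--     return result
-- ===== Notes on version B (the rewrite author's own statement) =====
-- stated objective: alternative
-- what changed: Replaces A's recursion, which builds an intermediate set per internal node and unions them upward, with a single iterative depth-first worklist (explicit stack) loop that adds each leaf once to one result set.
import Mathlib
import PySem

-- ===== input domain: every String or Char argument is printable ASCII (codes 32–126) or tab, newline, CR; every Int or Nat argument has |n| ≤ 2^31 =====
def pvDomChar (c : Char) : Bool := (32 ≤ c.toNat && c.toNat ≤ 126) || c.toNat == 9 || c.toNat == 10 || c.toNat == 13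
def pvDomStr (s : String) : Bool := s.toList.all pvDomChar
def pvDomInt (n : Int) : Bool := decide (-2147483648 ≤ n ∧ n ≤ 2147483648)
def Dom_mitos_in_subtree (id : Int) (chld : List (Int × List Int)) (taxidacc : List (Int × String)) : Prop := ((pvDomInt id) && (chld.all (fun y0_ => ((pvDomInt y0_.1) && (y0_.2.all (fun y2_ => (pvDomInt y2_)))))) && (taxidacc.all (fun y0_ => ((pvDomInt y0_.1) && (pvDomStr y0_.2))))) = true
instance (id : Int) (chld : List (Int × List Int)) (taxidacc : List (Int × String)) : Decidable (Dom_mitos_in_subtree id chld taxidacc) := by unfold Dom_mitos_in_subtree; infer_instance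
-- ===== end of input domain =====

-- B replaces A's recursion (which builds and unions one intermediate set per internal node)
-- by a single iterative depth-first worklist loop adding leaves to one result set.
-- Both return a set; under Pre_ (no cycle reachable from id) the ports produce identical lists.

-- ===== PORT A =====
-- A's recursion, step for step; the Nat fuel only makes it total in Lean: under
-- Pre_mitos_in_subtree the recursion depth is < chld.length + 1, so the fuel is never exhausted.
def mitosGoA (chld : List (Int × List Int)) (taxidacc : List (Int × String)) :
    Nat → Int → PySem.Set (Int × String)
  | 0, _ => PySem.Set.empty
  | f + 1, id =>
    match chld.lookup id with
    | some cs =>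
        -- for c in chld[id]: cont.update(mitos_in_subtree(c, ...))
        cs.foldl (fun cont c => PySem.Set.update cont (mitosGoA chld taxidacc f c)) PySem.Set.empty
    | none =>
        match taxidacc.lookup id with
        | some a => PySem.Set.add PySem.Set.empty (id, a)   -- cont.add((id, taxidacc[id]))
        | none => PySem.Set.empty

def mitos_in_subtree (id : Int) (chld : List (Int × List Int)) (taxidacc : List (Int × String)) : List (Int × String) :=
  mitosGoA chld taxidacc (chld.length + 1) id

-- ===== PORT B =====
-- pvWork computes an upper bound on the number of loop iterations (the unfolded-tree size,
-- truncated at depth chld.length + 1); it is only the fuel making B's while-loop total in Lean.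
def pvWork (chld : List (Int × List Int)) : Nat → Int → Nat
  | 0, _ => 1
  | k + 1, n =>
    match chld.lookup n with
    | some cs => 1 + (cs.map (pvWork chld k)).sum
    | none => 1

-- B's while-loop. The Lean stack stores Python's stack reversed (head = top), so Python's
-- 'stack.extend(reversed(chld[node])); stack.pop()' is 'cs ++ rest' / matching the head — exact.
def mitosLoopB (chld : List (Int × List Int)) (taxidacc : List (Int × String)) :
    Nat → PySem.Set (Int × String) → List Int → PySem.Set (Int × String)
  | _, result, [] => result
  | 0, result, _ :: _ => result
  | f + 1, result, node :: rest =>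
    match chld.lookup node with
    | some cs => mitosLoopB chld taxidacc f result (cs ++ rest)
    | none =>
        match taxidacc.lookup node with
        | some a => mitosLoopB chld taxidacc f (PySem.Set.add result (node, a)) rest
        | none => mitosLoopB chld taxidacc f result rest

def mitos_in_subtree_alt (id : Int) (chld : List (Int × List Int)) (taxidacc : List (Int × String)) : List (Int × String) :=
  mitosLoopB chld taxidacc (pvWork chld (chld.length + 1) id) PySem.Set.empty [id]

-- ===== PRECONDITION & SPEC =====
-- pvFrontier chld k n = the nodes reachable from n by a path of exactly k child-edges.
def pvFrontier (chld : List (Int × List Int)) : Nat → Int → List Int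
  | 0, n => [n]
  | k + 1, n => ((chld.lookup n).getD []).flatMap (pvFrontier chld k)

-- Pre_ excludes exactly the inputs on which Python A never returns (RecursionError: a cycle in
-- chld reachable from id): by pigeonhole, the child graph has a path of length chld.length + 1
-- from id iff a cycle is reachable from id; on acyclic inputs Pre_ always holds.
def Pre_mitos_in_subtree (id : Int) (chld : List (Int × List Int)) (taxidacc : List (Int × String)) : Prop :=
  pvFrontier chld (chld.length + 1) id = []
instance (id : Int) (chld : List (Int × List Int)) (taxidacc : List (Int × String)) : Decidable (Pre_mitos_in_subtree id chld taxidacc) := by unfold Pre_mitos_in_subtree; infer_instance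

def pvWitness_mitos_in_subtree : Int × (List (Int × List Int)) × (List (Int × String)) :=
  (1, [(1, [2, 3]), (3, [4])], [(2, "AB"), (4, "CD")])

def Spec_mitos_in_subtree (id : Int) (chld : List (Int × List Int)) (taxidacc : List (Int × String)) (out : List (Int × String)) : Prop := out = mitos_in_subtree_alt id chld taxidacc
instance (id : Int) (chld : List (Int × List Int)) (taxidacc : List (Int × String)) (out : List (Int × String)) : Decidable (Spec_mitos_in_subtree id chld taxidacc out) := by unfold Spec_mitos_in_subtree; infer_instance

-- ===== CLAIM (what is proved, stated in full; the proofs are below) =====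
def Claim_equal_mitos_in_subtree : Prop := ∀ (id : Int) (chld : List (Int × List Int)) (taxidacc : List (Int × String)), Dom_mitos_in_subtree id chld taxidacc → Pre_mitos_in_subtree id chld taxidacc → Spec_mitos_in_subtree id chld taxidacc (mitos_in_subtree id chld taxidacc)

-- ===== LEMMAS AND PROOFS =====

-- The leaf/accession pairs below a node in depth-first order, with repetitions (same fuel shape as A).
def mitosLv (chld : List (Int × List Int)) (taxidacc : List (Int × String)) :
    Nat → Int → List (Int × String)
  | 0, _ => []
  | k + 1, n =>
    match chld.lookup n with
    | some cs => cs.flatMap (mitosLv chld taxidacc k)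
    | none =>
        match taxidacc.lookup n with
        | some a => [(n, a)]
        | none => []

theorem frontier_mono (chld : List (Int × List Int)) :
    ∀ (k : Nat) (n : Int), pvFrontier chld k n = [] → pvFrontier chld (k + 1) n = [] := by
  intro k
  induction k with
  | zero => intro n h; simp [pvFrontier] at h
  | succ k ih =>
    intro n h
    rw [pvFrontier] at h ⊢
    rw [List.flatMap_eq_nil_iff] at h ⊢
    intro c hc
    exact ih c (h c hc)

theorem work_stab (chld : List (Int × List Int)) :
    ∀ (k : Nat) (n : Int), pvFrontier chld k n = [] →
      pvWork chld (k + 1) n = pvWork chld k n := by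
  intro k
  induction k with
  | zero => intro n h; simp [pvFrontier] at h
  | succ k ih =>
    intro n h
    rw [pvFrontier, List.flatMap_eq_nil_iff] at h
    cases hl : chld.lookup n with
    | none => rw [pvWork, pvWork, hl]
    | some cs =>
      rw [pvWork, pvWork, hl]
      dsimp only
      have : cs.map (pvWork chld (k + 1)) = cs.map (pvWork chld k) :=
        List.map_congr_left (fun c hc => ih c (h c (by simp [hl, hc])))
      rw [this]

theorem lv_stab (chld : List (Int × List Int)) (taxidacc : List (Int × String)) :
    ∀ (k : Nat) (n : Int), pvFrontier chld k n = [] →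
      mitosLv chld taxidacc (k + 1) n = mitosLv chld taxidacc k n := by
  intro k
  induction k with
  | zero => intro n h; simp [pvFrontier] at h
  | succ k ih =>
    intro n h
    rw [pvFrontier, List.flatMap_eq_nil_iff] at h
    cases hl : chld.lookup n with
    | none => rw [mitosLv, mitosLv, hl]
    | some cs =>
      rw [mitosLv, mitosLv, hl]
      dsimp only
      exact List.flatMap_congr (fun c hc => ih c (h c (by simp [hl, hc])))

theorem work_pos (chld : List (Int × List Int)) (k : Nat) (n : Int) : 1 ≤ pvWork chld k n := by
  cases k with
  | zero => simp [pvWork]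
  | succ k => cases hl : chld.lookup n <;> simp [pvWork, hl]

-- s.update(set(xs)) = s.update(xs)
theorem update_ofList {α : Type} [BEq α] [LawfulBEq α] (r : PySem.Set α) (xs : List α) :
    PySem.Set.update r (PySem.Set.ofList xs) = PySem.Set.update r xs := by
  induction xs using List.reverseRecOn generalizing r with
  | nil => simp [PySem.Set.ofList_nil]
  | append_singleton s x ih =>
    rw [PySem.Set.ofList_append_singleton]
    by_cases hx : x ∈ s
    · rw [PySem.Set.add_of_mem ((PySem.Set.mem_ofList s x).2 hx), ih,
          PySem.Set.update_append, PySem.Set.update_cons, PySem.Set.update_nil]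
      refine (PySem.Set.add_of_mem ?_).symm
      rw [PySem.Set.mem_update]
      exact Or.inr hx
    · rw [PySem.Set.add_of_not_mem (fun hm => hx ((PySem.Set.mem_ofList s x).1 hm)),
          PySem.Set.update_append, PySem.Set.update_append, ih]

-- folding update over a list = one update by the concatenation
theorem foldl_update_flatMap {α β : Type} [BEq α] [LawfulBEq α] (h : β → List α) :
    ∀ (cs : List β) (r : PySem.Set α),
      cs.foldl (fun r c => PySem.Set.update r (h c)) r = PySem.Set.update r (cs.flatMap h) := by
  intro cs
  induction cs with
  | nil => intro r; simp [PySem.Set.update_nil]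
  | cons c cs ih =>
    intro r
    simp only [List.foldl_cons, List.flatMap_cons]
    rw [ih, PySem.Set.update_append]

-- A's recursion returns the set of the depth-first leaf list.
theorem a_eq_ofList_lv (chld : List (Int × List Int)) (taxidacc : List (Int × String)) :
    ∀ (f : Nat) (n : Int),
      mitosGoA chld taxidacc f n = PySem.Set.ofList (mitosLv chld taxidacc f n) := by
  intro f
  induction f with
  | zero => intro n; simp [mitosGoA, mitosLv, PySem.Set.empty, PySem.Set.ofList_nil]
  | succ f ih =>
    intro n
    cases hl : chld.lookup n with
    | some cs =>
      rw [mitosGoA, mitosLv, hl]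
      dsimp only
      have he : cs.foldl (fun cont c => PySem.Set.update cont (mitosGoA chld taxidacc f c)) PySem.Set.empty
          = cs.foldl (fun cont c => PySem.Set.update cont (mitosLv chld taxidacc f c)) PySem.Set.empty := by
        apply List.foldl_ext
        intro a c hc
        rw [ih c, update_ofList]
      rw [he, foldl_update_flatMap]
      rfl
    | none =>
      cases ht : taxidacc.lookup n with
      | some a =>
        rw [mitosGoA, mitosLv, hl]
        dsimp only
        simp [ht, PySem.Set.add, PySem.Set.empty, PySem.Set.ofList]
      | none =>
        rw [mitosGoA, mitosLv, hl]
        dsimp only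
        simp [ht, PySem.Set.empty, PySem.Set.ofList_nil]

-- Loop invariant for B: with cycle-free stack entries and enough fuel, the loop
-- adds exactly the depth-first leaf lists of the stack to the result set.
theorem loopB_inv (chld : List (Int × List Int)) (taxidacc : List (Int × String)) :
    ∀ (f : Nat) (stack : List Int) (r : PySem.Set (Int × String)),
      (∀ n ∈ stack, pvFrontier chld (chld.length + 1) n = []) →
      (stack.map (pvWork chld (chld.length + 1))).sum ≤ f →
      mitosLoopB chld taxidacc f r stack
        = PySem.Set.update r (stack.flatMap (mitosLv chld taxidacc (chld.length + 1))) := by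
  intro f
  induction f with
  | zero =>
    intro stack r hF hW
    cases stack with
    | nil => simp [mitosLoopB, PySem.Set.update_nil]
    | cons n rest =>
      exfalso
      have h1 := work_pos chld (chld.length + 1) n
      simp only [List.map_cons, List.sum_cons, Nat.le_zero] at hW
      omega
  | succ f ih =>
    intro stack r hF hW
    cases stack with
    | nil => simp [mitosLoopB, PySem.Set.update_nil]
    | cons n rest =>
      have hFn := hF n (by simp)
      simp only [List.map_cons, List.sum_cons] at hW
      cases hl : chld.lookup n with
      | some cs =>
        have hkids : ∀ c ∈ cs, pvFrontier chld chld.length c = [] := by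
          rw [pvFrontier, List.flatMap_eq_nil_iff] at hFn
          intro c hc
          exact hFn c (by simp [hl, hc])
        have hFc : ∀ c ∈ cs, pvFrontier chld (chld.length + 1) c = [] :=
          fun c hc => frontier_mono chld _ c (hkids c hc)
        have hstep : mitosLoopB chld taxidacc (f + 1) r (n :: rest)
            = mitosLoopB chld taxidacc f r (cs ++ rest) := by
          rw [mitosLoopB, hl]
        rw [hstep, ih (cs ++ rest) r]
        · have h1 : (cs ++ rest).flatMap (mitosLv chld taxidacc (chld.length + 1))
              = mitosLv chld taxidacc (chld.length + 1) n
                ++ rest.flatMap (mitosLv chld taxidacc (chld.length + 1)) := by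
            rw [List.flatMap_append, mitosLv, hl]
            dsimp only
            congr 1
            exact List.flatMap_congr (fun c hc => lv_stab chld taxidacc _ c (hkids c hc))
          rw [h1, List.flatMap_cons]
        · intro m hm
          rcases List.mem_append.1 hm with hm | hm
          · exact hFc m hm
          · exact hF m (by simp [hm])
        · have hWc : cs.map (pvWork chld (chld.length + 1)) = cs.map (pvWork chld chld.length) :=
            List.map_congr_left (fun c hc => work_stab chld _ c (hkids c hc))
          have hWn : pvWork chld (chld.length + 1) n
              = 1 + (cs.map (pvWork chld chld.length)).sum := by
            rw [pvWork, hl]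
          rw [List.map_append, List.sum_append, hWc]
          omega
      | none =>
        have hWn := work_pos chld (chld.length + 1) n
        have hrest : ∀ m ∈ rest, pvFrontier chld (chld.length + 1) m = [] :=
          fun m hm => hF m (by simp [hm])
        have hWrest : (rest.map (pvWork chld (chld.length + 1))).sum ≤ f := by omega
        have hLv : mitosLv chld taxidacc (chld.length + 1) n
            = match taxidacc.lookup n with
              | some a => [(n, a)]
              | none => [] := by
          rw [mitosLv, hl]
        cases ht : taxidacc.lookup n with
        | some a =>
          have hstep : mitosLoopB chld taxidacc (f + 1) r (n :: rest)
              = mitosLoopB chld taxidacc f (PySem.Set.add r (n, a)) rest := by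
            rw [mitosLoopB, hl, ht]
          rw [hstep, ih rest (PySem.Set.add r (n, a)) hrest hWrest, List.flatMap_cons, hLv, ht,
              List.singleton_append, PySem.Set.update_cons]
        | none =>
          have hstep : mitosLoopB chld taxidacc (f + 1) r (n :: rest)
              = mitosLoopB chld taxidacc f r rest := by
            rw [mitosLoopB, hl, ht]
          rw [hstep, ih rest r hrest hWrest, List.flatMap_cons, hLv, ht, List.nil_append]

-- ===== VERDICT (by name: the statement is the Claim_ definition above) =====
theorem mitos_in_subtree_spec : Claim_equal_mitos_in_subtree := by
  intro id chld taxidacc _ hpre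
  unfold Spec_mitos_in_subtree mitos_in_subtree mitos_in_subtree_alt
  rw [a_eq_ofList_lv,
      loopB_inv chld taxidacc _ [id] PySem.Set.empty
        (by intro n hn; simp only [List.mem_singleton] at hn; subst hn; exact hpre)
        (by simp),
      List.flatMap_cons, List.flatMap_nil, List.append_nil]
  exact (PySem.Set.update_empty _).symm
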